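-- pv_equiv track=rewrite | github.com/Sumanth-Katnam/leet-code-py | Interview Questions OLD/movieAwards.py | minimumGroups
-- ===== SOURCE A (Python) =====
-- def minimumGroups(awards, k):
--     awards.sort()
--     min_award = awards[0]
--     count = 1
--     for award in awards:
--         if award - min_award > k:
--             count += 1
--             min_award = award
--     return count
-- ===== SOURCE B (Python) =====
-- def minimumGroups(awards, k):
--     awards.sort()
--     n = len(awards)
--     count = 0
--     i = 0
--     while i < n:
--         limit = awards[i] + k
--         # binary search in awards[i+1:n] for the first index whose value exceeds limit
--         lo, hi = i + 1, n
--         while lo < hi: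
--             mid = (lo + hi) // 2
--             if awards[mid] <= limit:
--                 lo = mid + 1
--             else:
--                 hi = mid
--         i = lo
--         count += 1
--     return count
-- ===== Notes on version B (the rewrite author's own statement) =====
-- stated objective: alternative
-- what changed: Replaces the full linear min-tracking scan over the sorted list by an anchor loop that jumps from each group start to the next via binary search (O(g log n) comparisons after the sort, for g groups, instead of A's O(n) scan).
-- outside the precondition, e.g. on minimumGroups([0], -1): A returns 2, B returns 1; on minimumGroups([3, 3, 5], -2): A returns 4, B returns 3; on minimumGroups([], 0): A raises IndexError, B returns 0
import Mathlib
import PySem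

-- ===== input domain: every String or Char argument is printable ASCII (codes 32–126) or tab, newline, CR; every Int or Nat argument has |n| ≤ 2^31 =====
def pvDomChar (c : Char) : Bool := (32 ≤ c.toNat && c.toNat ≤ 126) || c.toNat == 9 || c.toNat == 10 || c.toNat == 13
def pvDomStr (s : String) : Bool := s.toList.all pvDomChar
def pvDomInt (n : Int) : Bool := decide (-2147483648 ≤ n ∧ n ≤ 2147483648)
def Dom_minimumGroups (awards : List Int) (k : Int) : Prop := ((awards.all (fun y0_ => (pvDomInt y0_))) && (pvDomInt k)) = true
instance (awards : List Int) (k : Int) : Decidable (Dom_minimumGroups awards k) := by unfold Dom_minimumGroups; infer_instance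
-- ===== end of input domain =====

-- B replaces A's full linear min-tracking scan after the sort by anchor-to-anchor binary-search
-- jumps; both sort the argument in place (same mutation), and the equivalence is about the return value.


-- ===== PORT A =====
-- awards.sort(); min_award = awards[0]; count = 1; for-loop updating (min_award, count); return count.
-- (awards[0] is pyGetD with default 0: Pre_ excludes the empty list, where Python raises IndexError.)
def minimumGroups (awards : List Int) (k : Int) : Int :=
  let s := PySem.List.sorted awards (fun x => x) false
  let min0 := PySem.List.pyGetD s 0 0
  (s.foldl (fun (st : Int × Int) award =>
      if award - st.1 > k then (award, st.2 + 1) else st) (min0, 1)).2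

-- ===== PORT B =====
-- inner `while lo < hi` binary search of Source B; fuel only makes the recursion structural,
-- it is hi - lo at the call site so it never runs out.
def pvBsearchF (fuel : Nat) (s : List Int) (limit : Int) (lo hi : Nat) : Nat :=
  match fuel with
  | 0 => lo
  | fuel + 1 =>
    if lo < hi then
      let mid := (lo + hi) / 2
      if PySem.List.pyGetD s (mid : Int) 0 ≤ limit then pvBsearchF fuel s limit (mid + 1) hi
      else pvBsearchF fuel s limit lo mid
    else lo

def pvBsearch (s : List Int) (limit : Int) (lo hi : Nat) : Nat :=
  pvBsearchF (hi - lo) s limit lo hi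

-- outer `while i < n` loop of Source B (fuel = n at the call site; i advances past lo = i+1 each turn).
def pvLoopF (fuel : Nat) (s : List Int) (k : Int) (i : Nat) : Int :=
  match fuel with
  | 0 => 0
  | fuel + 1 =>
    if i < s.length then
      let limit := PySem.List.pyGetD s (i : Int) 0 + k
      let j := pvBsearch s limit (i + 1) s.length
      1 + pvLoopF fuel s k j
    else 0

def minimumGroups_alt (awards : List Int) (k : Int) : Int :=
  let s := PySem.List.sorted awards (fun x => x) false
  pvLoopF s.length s k 0

-- ===== PRECONDITION & SPEC =====
-- Pre_ excludes the empty list, where A raises IndexError on awards[0], and negative k, where no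
-- grouping with range ≤ k exists at all (even a singleton group has range 0 > k) so the count either
-- program returns is an accident of its loop: A returns len(awards)+1, B returns len(awards), and
-- neither value is specified by the task.
def Pre_minimumGroups (awards : List Int) (k : Int) : Prop := awards ≠ [] ∧ 0 ≤ k
instance (awards : List Int) (k : Int) : Decidable (Pre_minimumGroups awards k) := by unfold Pre_minimumGroups; infer_instance
def pvWitness_minimumGroups : List Int × Int := ([1, 3, 7], 2)

def Spec_minimumGroups (awards : List Int) (k : Int) (out : Int) : Prop := out = minimumGroups_alt awards k
instance (awards : List Int) (k : Int) (out : Int) : Decidable (Spec_minimumGroups awards k out) := by unfold Spec_minimumGroups; infer_instance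

-- ===== CLAIM (what is proved, stated in full; the proofs are below) =====
def Claim_equal_minimumGroups : Prop := ∀ (awards : List Int) (k : Int), Dom_minimumGroups awards k → Pre_minimumGroups awards k → Spec_minimumGroups awards k (minimumGroups awards k)

-- ===== LEMMAS AND PROOFS =====

-- reference function: greedy group count of an (already sorted) list
def pvGreedy (k : Int) : List Int → Int
  | [] => 0
  | h :: t => 1 + pvGreedy k (t.dropWhile (fun a => decide (a ≤ h + k)))
termination_by l => l.length
decreasing_by simpa using Nat.lt_succ_of_le (List.length_dropWhile_le _ _)

theorem pvGreedy_nil (k : Int) : pvGreedy k [] = 0 := by rw [pvGreedy]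

theorem pvGreedy_cons (k h : Int) (t : List Int) :
    pvGreedy k (h :: t) = 1 + pvGreedy k (t.dropWhile (fun a => decide (a ≤ h + k))) := by
  rw [pvGreedy]

theorem pvDropWhile_eq_drop (p : Int → Bool) (l : List Int) :
    l.dropWhile p = l.drop (l.takeWhile p).length := by
  induction l with
  | nil => rfl
  | cons a t ih =>
    by_cases h : p a = true
    · simp [List.takeWhile_cons, h, ih]
    · simp [List.takeWhile_cons, h]

theorem pvTakeWhile_getElem_false (p : Int → Bool) (l : List Int)
    (h : (l.takeWhile p).length < l.length) :
    p (l[(l.takeWhile p).length]'h) = false := by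
  induction l with
  | nil => simp at h
  | cons a t ih =>
    by_cases hp : p a = true
    · simp only [List.takeWhile_cons, hp, if_true, List.length_cons] at h ⊢
      simpa using ih (by omega)
    · simp only [List.takeWhile_cons, hp] at h ⊢
      simp [eq_false_of_ne_true hp]

theorem pvGetElem_idx (s : List Int) (i j : Nat) (h : i = j) (hi : i < s.length) :
    s[i]'hi = s[j]'(h ▸ hi) := by subst h; rfl

theorem pvTakeWhile_getElem_true (p : Int → Bool) (l : List Int) (j : Nat)
    (hj : j < (l.takeWhile p).length) (hl : j < l.length) :
    p (l[j]'hl) = true := by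
  have hpre := List.takeWhile_prefix (l := l) (p := p)
  have heq := hpre.getElem hj
  exact heq ▸ List.mem_takeWhile_imp (List.getElem_mem hj)

-- binary-search characterisation: it returns the split point m
theorem pvBsearchF_eq (s : List Int) (limit : Int) :
    ∀ n lo hi m, hi - lo ≤ n → lo ≤ m → m ≤ hi →
      (∀ idx, lo ≤ idx → idx < m → s.getD idx 0 ≤ limit) →
      (∀ idx, m ≤ idx → idx < hi → ¬ s.getD idx 0 ≤ limit) →
      pvBsearchF n s limit lo hi = m := by
  intro n
  induction n with
  | zero => intro lo hi m hn h1 h2 _ _; simp only [pvBsearchF]; omega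
  | succ n ih =>
    intro lo hi m hn h1 h2 hlow hhigh
    by_cases hlt : lo < hi
    · have hmlt : (lo + hi) / 2 < hi := by omega
      have hmge : lo ≤ (lo + hi) / 2 := by omega
      simp only [pvBsearchF, hlt, if_true]
      split
      · next hp =>
        have hp' : s.getD ((lo + hi) / 2) 0 ≤ limit := by
          rwa [PySem.List.pyGetD_natCast] at hp
        have hm : (lo + hi) / 2 < m := by
          by_contra hc
          exact hhigh _ (by omega) hmlt hp'
        exact ih _ _ m (by omega) (by omega) h2
          (fun idx ha hb => hlow idx (by omega) hb) hhigh
      · next hp =>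
        have hp' : ¬ s.getD ((lo + hi) / 2) 0 ≤ limit := by
          rwa [PySem.List.pyGetD_natCast] at hp
        have hm : m ≤ (lo + hi) / 2 := by
          by_contra hc
          exact hp' (hlow _ hmge (by omega))
        exact ih _ _ m (by omega) h1 hm hlow
          (fun idx ha hb => hhigh idx ha (by omega))
    · simp only [pvBsearchF, hlt, if_false]; omega

-- on a sorted list, pvBsearch finds lo + length of the ≤-limit prefix of (s.drop lo)
theorem pvBsearch_eq_takeWhile (s : List Int) (limit : Int) (lo : Nat)
    (hs : s.Pairwise (fun a b => a ≤ b)) (hlo : lo ≤ s.length) :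
    pvBsearch s limit lo s.length
      = lo + ((s.drop lo).takeWhile (fun a => decide (a ≤ limit))).length := by
  set p : Int → Bool := fun a => decide (a ≤ limit) with hp
  set c := ((s.drop lo).takeWhile p).length with hc
  have hcle : c ≤ (s.drop lo).length := (List.takeWhile_prefix p).length_le
  have hdlen : (s.drop lo).length = s.length - lo := by simp
  have hget : ∀ j (h : j < (s.drop lo).length), (s.drop lo)[j] = s[lo + j]'(by omega) := by
    intro j h; simp [List.getElem_drop]
  apply pvBsearchF_eq
  · omega
  · omega
  · omega
  · intro idx h1 h2
    have hj : idx - lo < c := by omega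
    have hjl : idx - lo < (s.drop lo).length := by omega
    have htw := pvTakeWhile_getElem_true p (s.drop lo) (idx - lo) hj hjl
    rw [hget _ hjl] at htw
    rw [List.getD_eq_getElem s 0 (by omega),
      pvGetElem_idx s idx (lo + (idx - lo)) (by omega) (by omega)]
    simpa [hp] using htw
  · intro idx h1 h2
    -- the element at lo + c fails the test; sortedness pushes the failure up
    have hcl : c < (s.drop lo).length := by omega
    have hfail := pvTakeWhile_getElem_false p (s.drop lo) (by omega)
    rw [hget _ hcl] at hfail
    have hfail' : ¬ s[lo + c]'(by omega) ≤ limit := by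
      simpa [hp] using of_decide_eq_false hfail
    rw [List.getD_eq_getElem s 0 (by omega)]
    intro hle
    apply hfail'
    rcases Nat.eq_or_lt_of_le (show lo + c ≤ idx by omega) with he | hlt
    · exact he ▸ hle
    · have hmono := (List.pairwise_iff_getElem.mp hs) (lo + c) idx (by omega) (by omega) hlt
      exact le_trans hmono hle

-- the outer loop computes the greedy group count of the remaining suffix
theorem pvLoopF_eq_greedy (s : List Int) (k : Int) (hs : s.Pairwise (fun a b => a ≤ b)) :
    ∀ n i, s.length - i ≤ n → pvLoopF n s k i = pvGreedy k (s.drop i) := by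
  intro n
  induction n with
  | zero =>
    intro i hn
    have hi : ¬ i < s.length := by omega
    rw [List.drop_eq_nil_of_le (by omega), pvGreedy_nil]
    simp [pvLoopF]
  | succ n ih =>
    intro i hn
    by_cases hi : i < s.length
    · have hd : s.drop i = s[i] :: s.drop (i + 1) := List.drop_eq_getElem_cons hi
      have hgd : PySem.List.pyGetD s (i : Int) 0 = s[i] := by
        rw [PySem.List.pyGetD_natCast]; exact List.getD_eq_getElem s 0 hi
      have hb := pvBsearch_eq_takeWhile s (s[i] + k) (i + 1) hs (by omega)
      set c := ((s.drop (i + 1)).takeWhile (fun a => decide (a ≤ s[i] + k))).length with hc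
      have hcle : c ≤ (s.drop (i + 1)).length := (List.takeWhile_prefix _).length_le
      have hdlen : (s.drop (i + 1)).length = s.length - (i + 1) := by simp
      have hdw : s.drop (i + 1 + c) = (s.drop (i + 1)).dropWhile (fun a => decide (a ≤ s[i] + k)) := by
        rw [pvDropWhile_eq_drop, ← hc, List.drop_drop]
        try congr 1
        try omega
      simp only [pvLoopF, hi, if_true, hgd]
      rw [hb, ih (i + 1 + c) (by omega), hdw, hd, pvGreedy_cons]
    · rw [List.drop_eq_nil_of_le (by omega), pvGreedy_nil]
      simp [pvLoopF, hi]

-- A's fold in closed form: its count is c plus the greedy count after discarding the ≤ m+k prefix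
theorem pvFoldA_eq (k : Int) :
    ∀ (l : List Int) (m c : Int),
      (l.foldl (fun (st : Int × Int) award =>
          if award - st.1 > k then (award, st.2 + 1) else st) (m, c)).2
        = c + pvGreedy k (l.dropWhile (fun a => decide (a ≤ m + k))) := by
  intro l
  induction l with
  | nil => intro m c; simp [pvGreedy_nil]
  | cons a t ih =>
    intro m c
    by_cases h : a - m > k
    · have hna : ¬ a ≤ m + k := by omega
      simp only [List.foldl_cons, if_pos h]
      rw [ih a (c + 1), List.dropWhile_cons_of_neg (by simpa using hna), pvGreedy_cons]
      ring
    · have ha : a ≤ m + k := by omega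
      simp only [List.foldl_cons, if_neg h]
      rw [ih m c, List.dropWhile_cons_of_pos (by simpa using ha)]

-- A, unfolded on a nonempty sorted list
theorem pvA_eq (awards : List Int) (k : Int) (hne : awards ≠ []) :
    minimumGroups awards k
      = 1 + pvGreedy k ((PySem.List.sorted awards (fun x => x) false).dropWhile
          (fun a => decide (a ≤ ((PySem.List.sorted awards (fun x => x) false).headI + k)))) := by
  have hsne : PySem.List.sorted awards (fun x => x) false ≠ [] := by
    intro h
    apply hne
    rw [← List.length_eq_zero_iff, ← PySem.List.length_sorted awards (fun x => x) false, h]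
    rfl
  obtain ⟨a0, t, hst⟩ := List.exists_cons_of_ne_nil hsne
  simp only [minimumGroups, hst, PySem.List.pyGetD_zero_cons]
  rw [pvFoldA_eq k (a0 :: t) a0 1]
  rfl

-- ===== VERDICT (by name: the statement is the Claim_ definition above) =====
theorem minimumGroups_spec : Claim_equal_minimumGroups := by
  intro awards k _ hpre
  obtain ⟨hne, hk⟩ := hpre
  unfold Spec_minimumGroups
  have hsp : (PySem.List.sorted awards (fun x => x) false).Pairwise (fun a b => a ≤ b) :=
    PySem.List.sorted_pairwise awards (fun x => x)
  have hsne : PySem.List.sorted awards (fun x => x) false ≠ [] := by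
    intro h
    apply hne
    rw [← List.length_eq_zero_iff, ← PySem.List.length_sorted awards (fun x => x) false, h]
    rfl
  obtain ⟨a0, t, hst⟩ := List.exists_cons_of_ne_nil hsne
  rw [pvA_eq awards k hne]
  simp only [minimumGroups_alt]
  rw [pvLoopF_eq_greedy _ k hsp _ 0 (by omega), List.drop_zero, hst]
  simp only [List.headI]
  rw [List.dropWhile_cons_of_pos (by simp; omega), pvGreedy_cons]
  rfl
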